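-- pv_equiv track=rewrite | github.com/Perkkola/qiskitcodes | sandbox.py | post_select
-- ===== SOURCE A (Python) =====
-- def cut_counts(counts, bit_indexes):
--     bit_indexes.sort(reverse=True)
--     new_counts = {}
--
--     for key in counts:
--         new_key = ''
--         for index in bit_indexes:
--             new_key += key[-1 - index]
--         if new_key in new_counts:
--             new_counts[new_key] += counts[key]
--         else:
--             new_counts[new_key] = counts[key]
--
--     return new_counts
--
-- def post_select(counts, z_index_list):
--
--
--     x_counts = cut_counts(counts, z_index_list)
--     expval = 0
--
--     for key, value in zip(x_counts.keys(), x_counts.values()):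
--         if(key.count('1') % 2 == 0):
--             expval += value
--         else:
--             expval -= value
--     return expval
-- ===== SOURCE B (Python) =====
-- def post_select(counts, z_index_list):
--     # single pass over counts: no intermediate bucket dict; the in-place
--     # reverse sort of z_index_list is kept to preserve A's argument mutation
--     z_index_list.sort(reverse=True)
--     expval = 0
--     for key, value in counts.items():
--         ones = sum(1 for index in z_index_list if key[-1 - index] == '1')
--         if ones % 2 == 0:
--             expval += value
--         else:
--             expval -= value
--     return expval
-- ===== Notes on version B (the rewrite author's own statement) =====
-- stated objective: simpler
-- what changed: B drops the intermediate bucket dictionary (cut_counts) entirely and accumulates the expectation value in one pass over counts, adding or subtracting each value by the parity of the '1' bits at the selected positions; the in-place reverse sort of z_index_list is kept.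
import Mathlib
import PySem

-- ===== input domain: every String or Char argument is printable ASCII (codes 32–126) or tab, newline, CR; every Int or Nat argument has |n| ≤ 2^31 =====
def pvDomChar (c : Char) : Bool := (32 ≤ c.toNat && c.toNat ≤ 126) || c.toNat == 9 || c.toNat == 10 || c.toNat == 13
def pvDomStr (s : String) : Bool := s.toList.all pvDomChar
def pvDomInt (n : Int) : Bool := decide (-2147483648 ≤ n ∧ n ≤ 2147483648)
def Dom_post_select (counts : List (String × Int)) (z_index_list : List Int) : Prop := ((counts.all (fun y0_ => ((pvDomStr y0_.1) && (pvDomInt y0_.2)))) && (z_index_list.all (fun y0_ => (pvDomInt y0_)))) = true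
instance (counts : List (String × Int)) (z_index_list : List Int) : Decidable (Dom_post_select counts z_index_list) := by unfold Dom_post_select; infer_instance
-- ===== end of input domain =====

-- B removes A's intermediate bucket dictionary and sums the signed values in a single pass
-- over counts (same cost); A sorts z_index_list in place — B performs the same sort, and the
-- equivalence proved here is about the return value.


-- ===== PORT A =====
-- new_key built over List Char (the PySem string representation); '' + key[-1-index] per index
def pvNewKey (bi : List Int) (key : List Char) : List Char :=
  bi.foldl (fun new_key index =>
    new_key ++ (((PySem.List.pyGet? key (-1 - index)).map (fun c => [c])).getD [])) []

-- 'for key in counts: … counts[key]' — iteration over the dict's pairs, counts[key] is the dict lookup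
def cut_counts (counts : List (String × Int)) (bit_indexes : List Int) : PySem.Dict (List Char) Int :=
  let bi := PySem.List.sorted bit_indexes (fun x => x) true
  counts.foldl (fun new_counts kv =>
    let new_key := pvNewKey bi kv.1.toList
    if new_counts.contains new_key then
      new_counts.insert new_key (new_counts.getD new_key 0 + (PySem.Dict.mk counts).getD kv.1 0)
    else
      new_counts.insert new_key ((PySem.Dict.mk counts).getD kv.1 0)) PySem.Dict.empty

def post_select (counts : List (String × Int)) (z_index_list : List Int) : Int :=
  let x_counts := cut_counts counts z_index_list
  -- zip(x_counts.keys(), x_counts.values()) is x_counts.items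
  x_counts.items.foldl (fun expval kv =>
    if PySem.Chars.count kv.1 ['1'] % 2 == 0 then expval + kv.2 else expval - kv.2) 0

-- ===== PORT B =====
def post_select_alt (counts : List (String × Int)) (z_index_list : List Int) : Int :=
  let zs := PySem.List.sorted z_index_list (fun x => x) true
  counts.foldl (fun expval kv =>
    let ones := zs.countP (fun index => PySem.List.pyGet? kv.1.toList (-1 - index) == some '1')
    if ones % 2 == 0 then expval + kv.2 else expval - kv.2) 0

-- ===== PRECONDITION & SPEC =====
-- Pre_ excludes (a) counts with duplicate keys — an association-list state a Python dict argument
-- cannot be in, where the list reading is ambiguous — and (b) indices for which key[-1 - index]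
-- raises IndexError in A (and in B).
def Pre_post_select (counts : List (String × Int)) (z_index_list : List Int) : Prop :=
  (counts.map (·.1)).Nodup ∧
  ∀ kv ∈ counts, ∀ index ∈ z_index_list,
    -(kv.1.toList.length : Int) ≤ -1 - index ∧ -1 - index < (kv.1.toList.length : Int)
instance (counts : List (String × Int)) (z_index_list : List Int) : Decidable (Pre_post_select counts z_index_list) := by unfold Pre_post_select; infer_instance

def pvWitness_post_select : (List (String × Int)) × List Int := ([("01", 3), ("11", 2)], [0, 1])

def Spec_post_select (counts : List (String × Int)) (z_index_list : List Int) (out : Int) : Prop := out = post_select_alt counts z_index_list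
instance (counts : List (String × Int)) (z_index_list : List Int) (out : Int) : Decidable (Spec_post_select counts z_index_list out) := by unfold Spec_post_select; infer_instance

-- ===== CLAIM (what is proved, stated in full; the proofs are below) =====
def Claim_equal_post_select : Prop := ∀ (counts : List (String × Int)) (z_index_list : List Int), Dom_post_select counts z_index_list → Pre_post_select counts z_index_list → Spec_post_select counts z_index_list (post_select counts z_index_list)

-- ===== LEMMAS AND PROOFS =====

-- the signed value a (projected key, value) pair contributes to the expectation value
def pvWeight (kv : List Char × Int) : Int :=
  if kv.1.count '1' % 2 == 0 then kv.2 else -kv.2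

theorem pvCountGo_one : ∀ (fuel : Nat) (l : List Char) (acc : Nat), l.length ≤ fuel →
    PySem.Chars.count.go ['1'] fuel l acc = acc + l.count '1' := by
  intro fuel
  induction fuel with
  | zero => intro l acc h; cases l with
    | nil => simp [PySem.Chars.count.go]
    | cons a t => simp at h
  | succ n ih => intro l acc h; cases l with
    | nil => simp [PySem.Chars.count.go]
    | cons a t =>
      rw [PySem.Chars.count.go]
      by_cases ha : a = '1'
      · simp [ha, List.isPrefixOf, ih t (acc + 1) (by simpa using h)]
        omega
      · simp [List.isPrefixOf, ha, ih t acc (by simpa using h)]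
        exact fun h' => absurd h'.symm ha

-- str.count('1') on a string of 0/1-like chars is the char count
theorem pvCount_one (cs : List Char) : PySem.Chars.count cs ['1'] = cs.count '1' := by
  simp [PySem.Chars.count, pvCountGo_one cs.length cs 0 le_rfl]

theorem pvGet_isSome_of_range (l : List Char) (i : Int)
    (h1 : -(l.length : Int) ≤ i) (h2 : i < l.length) : (PySem.List.pyGet? l i).isSome := by
  by_cases h : 0 ≤ i
  · simp [PySem.List.pyGet?, PySem.List.pyIdx?, h, h2]
  · simp [PySem.List.pyGet?, PySem.List.pyIdx?, h, h1]; omega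

-- both final loops are ±-accumulations
theorem pvFoldPM {α : Type} (f : α → Bool) (g : α → Int) (l : List α) (acc : Int) :
    l.foldl (fun e x => if f x then e + g x else e - g x) acc
      = acc + (l.map (fun x => if f x then g x else -g x)).sum := by
  induction l generalizing acc with
  | nil => simp
  | cons p t ih => simp only [List.foldl_cons, List.map_cons, List.sum_cons, ih]; split_ifs <;> ring

theorem pvWeight_add (k : List Char) (a b : Int) :
    pvWeight (k, a + b) = pvWeight (k, a) + pvWeight (k, b) := by
  unfold pvWeight; split_ifs <;> ring

-- replacing the unique item with key nk by (nk, old + v) adds pvWeight (nk, v) to the signed sum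
theorem pvSum_replace (items : List (List Char × Int)) (nk : List Char) (old v : Int)
    (hnd : (items.map (·.1)).Nodup) (hmem : (nk, old) ∈ items) :
    ((items.map (fun p => if p.1 == nk then (nk, old + v) else p)).map pvWeight).sum
      = (items.map pvWeight).sum + pvWeight (nk, v) := by
  induction items with
  | nil => simp at hmem
  | cons p t ih =>
    simp only [List.map_cons, List.nodup_cons, List.mem_map] at hnd
    rcases List.mem_cons.mp hmem with h | h
    · subst h
      simp only [List.map_cons, beq_self_eq_true, if_pos, List.sum_cons]
      have ht : t.map (fun p => if p.1 == nk then (nk, old + v) else p) = t := by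
        conv_rhs => rw [← List.map_id t]
        apply List.map_congr_left
        intro q hq
        have : q.1 ≠ nk := fun he => hnd.1 ⟨q, hq, he⟩
        simp [this]
      rw [ht, pvWeight_add]; ring
    · have hne : p.1 ≠ nk := by
        intro he
        exact hnd.1 ⟨(nk, old), h, he.symm ▸ rfl⟩
      rw [List.map_cons, List.map_cons, List.map_cons, List.sum_cons, List.sum_cons,
        if_neg (by simpa using hne), ih hnd.2 h]
      ring

-- one step of cut_counts' bucket loop adds pvWeight (new_key, v) to the signed sum of the dict
theorem pvStep_sum (d : PySem.Dict (List Char) Int) (nk : List Char) (v : Int)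
    (hnd : d.keys.Nodup) :
    (((if d.contains nk then d.insert nk (d.getD nk 0 + v) else d.insert nk v).items).map pvWeight).sum
      = (d.items.map pvWeight).sum + pvWeight (nk, v) := by
  by_cases hc : d.contains nk
  · obtain ⟨old, hold⟩ : ∃ old, (nk, old) ∈ d.items := by
      have := (PySem.Dict.contains_iff_mem_keys d nk).mp hc
      simp only [PySem.Dict.keys, List.mem_map] at this
      obtain ⟨p, hp, he⟩ := this
      exact ⟨p.2, by simpa [← he] using hp⟩
    have hget : d.getD nk 0 = old := PySem.Dict.getD_of_mem_items d hold hnd 0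
    rw [if_pos hc, PySem.Dict.items_insert_of_contains d _ hc, hget]
    exact pvSum_replace d.items nk old v (by simpa [PySem.Dict.keys] using hnd) hold
  · rw [if_neg (by simpa using hc), PySem.Dict.items_insert_of_not_contains d v (by simpa using hc)]
    simp

theorem pvNodup_keys_step (d : PySem.Dict (List Char) Int) (nk : List Char) (v : Int)
    (hnd : d.keys.Nodup) :
    ((if d.contains nk then d.insert nk (d.getD nk 0 + v) else d.insert nk v).keys).Nodup := by
  split_ifs <;> exact PySem.Dict.nodup_keys_insert d nk _ hnd

-- the bucket loop of cut_counts, signed-summed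
theorem pvLoop_sum (counts0 : List (String × Int)) (bi : List Int)
    (hnd0 : (counts0.map (·.1)).Nodup) :
    ∀ (l : List (String × Int)) (d : PySem.Dict (List Char) Int),
      (∀ kv ∈ l, kv ∈ counts0) → d.keys.Nodup →
      (((l.foldl (fun new_counts kv =>
          let new_key := pvNewKey bi kv.1.toList
          if new_counts.contains new_key then
            new_counts.insert new_key (new_counts.getD new_key 0 + (PySem.Dict.mk counts0).getD kv.1 0)
          else
            new_counts.insert new_key ((PySem.Dict.mk counts0).getD kv.1 0)) d).items).map pvWeight).sum
        = (d.items.map pvWeight).sum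
          + (l.map (fun kv => pvWeight (pvNewKey bi kv.1.toList, kv.2))).sum := by
  intro l
  induction l with
  | nil => intro d _ _; simp
  | cons kv t ih =>
    intro d hmem hnd
    have hv : (PySem.Dict.mk counts0).getD kv.1 0 = kv.2 := by
      refine PySem.Dict.getD_of_mem_items _ ?_ ?_ 0
      · exact hmem kv (List.mem_cons_self) 
      · simpa [PySem.Dict.keys] using hnd0
    simp only [List.foldl_cons]
    rw [ih _ (fun q hq => hmem q (List.mem_cons_of_mem kv hq))
        (pvNodup_keys_step d _ _ hnd)]
    rw [hv] at *
    rw [pvStep_sum d _ kv.2 hnd]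
    simp only [List.map_cons, List.sum_cons]
    ring

-- under the in-range hypothesis, '1'-count of the projected key = number of selected '1' bits
theorem pvNewKey_count (bi : List Int) (key : List Char)
    (h : ∀ i ∈ bi, -(key.length : Int) ≤ -1 - i ∧ -1 - i < (key.length : Int)) :
    (pvNewKey bi key).count '1'
      = bi.countP (fun index => PySem.List.pyGet? key (-1 - index) == some '1') := by
  unfold pvNewKey
  rw [PySem.List.foldl_append_eq_flatMap]
  simp only [List.nil_append]
  induction bi with
  | nil => simp
  | cons i t ih =>
    have hi := h i (List.mem_cons_self)
    obtain ⟨c, hc⟩ := Option.isSome_iff_exists.mp (pvGet_isSome_of_range key _ hi.1 hi.2)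
    rw [List.flatMap_cons, List.count_append, List.countP_cons,
      ih (fun j hj => h j (List.mem_cons_of_mem i hj))]
    by_cases h1 : c = '1'
    · simp [hc, h1]
      omega
    · simp [hc, h1]

-- ===== VERDICT (by name: the statement is the Claim_ definition above) =====
theorem post_select_spec : Claim_equal_post_select := by
  intro counts z_index_list _hdom hpre
  obtain ⟨hnd, hrange⟩ := hpre
  unfold Spec_post_select
  show post_select counts z_index_list = post_select_alt counts z_index_list
  simp only [post_select, post_select_alt, cut_counts]
  simp only [pvFoldPM, pvCount_one]
  rw [show (fun x : List Char × Int => if (x.1.count '1' % 2 == 0) = true then x.2 else -x.2)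
      = pvWeight from rfl]
  rw [pvLoop_sum counts (PySem.List.sorted z_index_list (fun x => x) true) hnd counts
        PySem.Dict.empty (fun _ h => h) (by simp [PySem.Dict.keys, PySem.Dict.empty])]
  simp only [PySem.Dict.empty, List.map_nil, List.sum_nil, zero_add]
  congr 1
  apply List.map_congr_left
  intro kv hkv
  have hr : ∀ i ∈ PySem.List.sorted z_index_list (fun x => x) true,
      -(kv.1.toList.length : Int) ≤ -1 - i ∧ -1 - i < (kv.1.toList.length : Int) := by
    intro i hi
    exact hrange kv hkv i ((PySem.List.mem_sorted _ _ _ _).mp hi)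
  rw [show pvWeight (pvNewKey (PySem.List.sorted z_index_list (fun x => x) true) kv.1.toList, kv.2)
      = (if (pvNewKey (PySem.List.sorted z_index_list (fun x => x) true) kv.1.toList).count '1' % 2 == 0
          then kv.2 else -kv.2) from rfl]
  rw [pvNewKey_count _ _ hr]
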